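-- pv_equiv track=rewrite | github.com/em4n0n/Projects-Tutorials | fibonacci_spiral.py | fibonacci_spiral
-- ===== SOURCE A (Python) =====
-- def fibonacci_spiral(n):
--   fib = [0, 1]
--
--   for i in range(2, n):
--     fib.append(fib[i - 1] + fib[i - 2])
--
--   # Compute the points of the Fibonacci spiral
--   points = [(0, 0)]  # Start at the origin (0, 0)
--   x, y = 0, 0  # Initialize the x and y coordinates
--
--   for i in range(1, n):
--     # Compute the next point based on the previous point and the value in the Fibonacci sequence
--     if i % 4 == 1:
--       x += fib[i]
--     elif i % 4 == 2:
--       y += fib[i]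
--     elif i % 4 == 3:
--       x -= fib[i]
--     else:
--       y -= fib[i]
--
--     points.append((x, y))
--
--   return points
-- ===== SOURCE B (Python) =====
-- def fibonacci_spiral(n):
--   # rotation vector + rolling Fibonacci pair; no fib list, no i%4 branching
--   points = [(0, 0)]
--   x = y = 0
--   dx, dy = 1, 0
--   a, b = 0, 1
--   for _ in range(1, n):
--     x += dx * b
--     y += dy * b
--     points.append((x, y))
--     dx, dy = -dy, dx
--     a, b = b, a + b
--   return points
-- ===== Notes on version B (the rewrite author's own statement) =====
-- stated objective: simpler
-- what changed: B replaces A's precomputed Fibonacci list and its index-mod branch chain by a single branch-free pass that maintains a rolling Fibonacci pair and a unit direction vector rotated a quarter turn each step.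
import Mathlib
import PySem

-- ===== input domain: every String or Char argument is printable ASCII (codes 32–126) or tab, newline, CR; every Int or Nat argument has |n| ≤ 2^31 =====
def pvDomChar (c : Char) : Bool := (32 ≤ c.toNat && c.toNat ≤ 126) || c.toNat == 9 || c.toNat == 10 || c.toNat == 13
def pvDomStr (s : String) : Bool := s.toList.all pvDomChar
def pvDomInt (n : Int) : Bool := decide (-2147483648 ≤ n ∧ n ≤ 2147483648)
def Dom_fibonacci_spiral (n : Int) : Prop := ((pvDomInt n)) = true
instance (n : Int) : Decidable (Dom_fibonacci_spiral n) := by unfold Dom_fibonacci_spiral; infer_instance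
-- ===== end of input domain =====

-- B replaces A's precomputed fib list and four-way i%4 branch by one branch-free pass
-- with a rolling Fibonacci pair and a 90°-rotating direction vector (simpler).

-- ===== PORT A =====
-- A's first loop: build the fib list
def pvFibListA (n : Int) : List Int :=
  (PySem.List.pyRange 2 n 1).foldl
    (fun fib i => fib ++ [PySem.List.pyGetD fib (i - 1) 0 + PySem.List.pyGetD fib (i - 2) 0])
    [0, 1]

-- A's second loop body; state = (points, x, y)
def pvStepA (fib : List Int) (st : List (Int × Int) × Int × Int) (i : Int) :
    List (Int × Int) × Int × Int :=
  let x := st.2.1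
  let y := st.2.2
  let f := PySem.List.pyGetD fib i 0
  if PySem.Int.mod i 4 = 1 then (st.1 ++ [(x + f, y)], x + f, y)
  else if PySem.Int.mod i 4 = 2 then (st.1 ++ [(x, y + f)], x, y + f)
  else if PySem.Int.mod i 4 = 3 then (st.1 ++ [(x - f, y)], x - f, y)
  else (st.1 ++ [(x, y - f)], x, y - f)

def fibonacci_spiral (n : Int) : List (Int × Int) :=
  ((PySem.List.pyRange 1 n 1).foldl (pvStepA (pvFibListA n)) ([(0, 0)], 0, 0)).1

-- ===== PORT B =====
-- B's counted loop (`for _ in range(1, n)`), transliterated as structural recursion on the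
-- iteration count; state = (x, y, dx, dy, a, b), emitting the appended points in order
def pvSpiralB : Nat → Int × Int × Int × Int × Int × Int → List (Int × Int)
  | 0, _ => []
  | k + 1, (x, y, dx, dy, a, b) =>
      (x + dx * b, y + dy * b) ::
        pvSpiralB k (x + dx * b, y + dy * b, -dy, dx, b, a + b)

def fibonacci_spiral_alt (n : Int) : List (Int × Int) :=
  (0, 0) :: pvSpiralB (n - 1).toNat (0, 0, 1, 0, 0, 1)

-- ===== PRECONDITION & SPEC =====
def Spec_fibonacci_spiral (n : Int) (out : List (Int × Int)) : Prop := out = fibonacci_spiral_alt n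
instance (n : Int) (out : List (Int × Int)) : Decidable (Spec_fibonacci_spiral n out) := by unfold Spec_fibonacci_spiral; infer_instance

-- ===== CLAIM (what is proved, stated in full; the proofs are below) =====
def Claim_equal_fibonacci_spiral : Prop := ∀ (n : Int), Dom_fibonacci_spiral n → Spec_fibonacci_spiral n (fibonacci_spiral n)

-- ===== LEMMAS AND PROOFS =====

-- mathematical Fibonacci numbers, used only in the proofs
def pvFibI : Nat → Int
  | 0 => 0
  | 1 => 1
  | (k + 2) => pvFibI k + pvFibI (k + 1)

theorem pvFibI_succ (m : Nat) (h : 1 ≤ m) : pvFibI (m + 1) = pvFibI (m - 1) + pvFibI m := by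
  obtain ⟨k, rfl⟩ := Nat.exists_eq_add_of_le h
  have e1 : 1 + k + 1 = k + 2 := by omega
  have e2 : 1 + k - 1 = k := by omega
  have e3 : 1 + k = k + 1 := by omega
  rw [e1, e2, e3]
  rfl

theorem pvFibListA_nat (m : Nat) :
    pvFibListA ((m + 2 : Nat) : Int) = (List.range (m + 2)).map pvFibI := by
  induction m with
  | zero => decide
  | succ k ih =>
    have hc : ((k + 3 : Nat) : Int) = ((k : Int) + 2) + 1 := by push_cast; ring
    have hr : PySem.List.pyRange 2 (((k : Int) + 2) + 1) 1
        = PySem.List.pyRange 2 ((k : Int) + 2) 1 ++ [(k : Int) + 2] :=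
      PySem.List.pyRange_one_succ_right (by omega)
    have hc2 : ((k + 2 : Nat) : Int) = (k : Int) + 2 := by push_cast; ring
    have ih' : (PySem.List.pyRange 2 ((k : Int) + 2) 1).foldl
        (fun fib i => fib ++ [PySem.List.pyGetD fib (i - 1) 0 + PySem.List.pyGetD fib (i - 2) 0])
        [0, 1] = (List.range (k + 2)).map pvFibI := by
      have := ih; rw [pvFibListA, hc2] at this; exact this
    rw [show (k + 1 + 2) = k + 3 from rfl, pvFibListA, hc, hr, List.foldl_append, ih']
    simp only [List.foldl_cons, List.foldl_nil]
    have h1 : (k : Int) + 2 - 1 = ((k + 1 : Nat) : Int) := by push_cast; ring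
    have h2 : (k : Int) + 2 - 2 = ((k : Nat) : Int) := by omega
    rw [h1, h2, PySem.List.pyGetD_natCast, PySem.List.pyGetD_natCast]
    have g1 : ((List.range (k + 2)).map pvFibI).getD (k + 1) 0 = pvFibI (k + 1) := by
      simp [List.getD]
    have g2 : ((List.range (k + 2)).map pvFibI).getD k 0 = pvFibI k := by
      have hk : k < k + 2 := by omega
      simp [List.getD, hk]
    rw [g1, g2]
    simp [pvFibI, List.range_succ, Int.add_comm]

theorem pvFibListA_getD (n : Int) (k : Nat) (h2 : 2 ≤ n) (hk : (k : Int) < n) :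
    PySem.List.pyGetD (pvFibListA n) (k : Int) 0 = pvFibI k := by
  have hn : n = ((n.toNat - 2 + 2 : Nat) : Int) := by omega
  rw [hn, pvFibListA_nat, PySem.List.pyGetD_natCast]
  have hklt : k < n.toNat - 2 + 2 := by omega
  simp [List.getD, hklt]

-- the direction vector A's i%4 branch implements at step m
def pvDir (m : Nat) : Int × Int :=
  match m % 4 with
  | 1 => (1, 0)
  | 2 => (0, 1)
  | 3 => (-1, 0)
  | _ => (0, -1)

theorem pvDir_succ (m : Nat) : pvDir (m + 1) = (-(pvDir m).2, (pvDir m).1) := by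
  have h : m % 4 = 0 ∨ m % 4 = 1 ∨ m % 4 = 2 ∨ m % 4 = 3 := by omega
  have hs : (m + 1) % 4 = (m % 4 + 1) % 4 := by omega
  rcases h with h | h | h | h <;> simp [pvDir, hs, h]

-- one step of A's loop, written with pvDir and pvFibI
theorem pvStepA_eq (n : Int) (m : Nat) (P : List (Int × Int)) (x y : Int)
    (h1 : 1 ≤ m) (hm : (m : Int) < n) :
    pvStepA (pvFibListA n) (P, x, y) (m : Int)
      = (P ++ [(x + (pvDir m).1 * pvFibI m, y + (pvDir m).2 * pvFibI m)],
         x + (pvDir m).1 * pvFibI m, y + (pvDir m).2 * pvFibI m) := by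
  have hf : PySem.List.pyGetD (pvFibListA n) (m : Int) 0 = pvFibI m :=
    pvFibListA_getD n m (by omega) hm
  have h4 : ((m : Int) % 4) = ((m % 4 : Nat) : Int) := by push_cast; rfl
  have h : m % 4 = 0 ∨ m % 4 = 1 ∨ m % 4 = 2 ∨ m % 4 = 3 := by omega
  rcases h with h | h | h | h <;>
    simp [pvStepA, hf, h4, h, pvDir, sub_eq_add_neg, neg_mul, one_mul]

-- the simulation: A's fold over range(m, m+k) appends exactly B's remaining points
theorem pvSegEq (n : Int) (k : Nat) : ∀ (m : Nat) (P : List (Int × Int)) (x y : Int),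
    1 ≤ m → ((m : Int) + k) ≤ n →
    ((PySem.List.pyRange (m : Int) ((m : Int) + k) 1).foldl
        (pvStepA (pvFibListA n)) (P, x, y)).1
      = P ++ pvSpiralB k (x, y, (pvDir m).1, (pvDir m).2, pvFibI (m - 1), pvFibI m) := by
  induction k with
  | zero =>
    intro m P x y h1 h2
    rw [PySem.List.pyRange_one_eq_nil (by omega)]
    simp [pvSpiralB]
  | succ k ih =>
    intro m P x y h1 h2
    have hk1 : ((k + 1 : Nat) : Int) = (k : Int) + 1 := by omega
    rw [hk1]
    have hcons : PySem.List.pyRange (m : Int) ((m : Int) + (k + 1)) 1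
        = (m : Int) :: PySem.List.pyRange ((m : Int) + 1) ((m : Int) + (k + 1)) 1 :=
      PySem.List.pyRange_one_cons (by omega)
    rw [hcons, List.foldl_cons,
      pvStepA_eq n m P x y h1 (by push_cast at h2; omega)]
    have hc : (m : Int) + 1 = ((m + 1 : Nat) : Int) := by push_cast; ring
    have hc2 : (m : Int) + ((k : Int) + 1) = ((m + 1 : Nat) : Int) + k := by
      push_cast; ring
    rw [hc2, hc, ih (m + 1) _ _ _ (by omega) (by push_cast at h2 ⊢; omega)]
    rw [pvSpiralB, pvDir_succ m,
      show m + 1 - 1 = m from rfl, pvFibI_succ m h1]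
    simp

-- ===== VERDICT (by name: the statement is the Claim_ definition above) =====
theorem fibonacci_spiral_spec : Claim_equal_fibonacci_spiral := by
  intro n _
  unfold Spec_fibonacci_spiral
  by_cases hn : 1 ≤ n
  · have hk : (1 : Int) + ((n - 1).toNat : Int) = n := by omega
    have := pvSegEq n (n - 1).toNat 1 [(0, 0)] 0 0 (by omega)
      (by rw [Nat.cast_one, hk])
    rw [Nat.cast_one, hk] at this
    rw [fibonacci_spiral, fibonacci_spiral_alt, this]
    simp [pvDir, pvFibI]
  · rw [fibonacci_spiral, fibonacci_spiral_alt,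
      PySem.List.pyRange_one_eq_nil (by omega : n ≤ 1),
      show (n - 1).toNat = 0 by omega]
    rfl
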